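-- pv_equiv track=rewrite | github.com/bywindow/Algorithm | src/BinarySearch/프로그래머스_보석쇼핑_Lv2.py | solution
-- ===== SOURCE A (Python) =====
-- from collections import Counter, defaultdict
--
-- def solution(gems):
--
--     start, end = 0, 0
--     answer = [start, len(gems)]
--     gem_len, gem_kinds = len(gems), len(set(gems))
--     gem_dict = defaultdict(lambda: 0) # 구매하는 범위 안에 존재하는 보석 개수
--     # left, right로 나눠서 하나씩 줄여가며 탐색
--     while True:
--         # start를 기준으로 끝까지 탐색했을 때 종료
--         if start == gem_len:
--             break;
--         cur_kinds = len(gem_dict)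
--         # 모든 종류가 들어있다
--         if cur_kinds == gem_kinds:
--             if end - start < answer[1] - answer[0]:
--                 answer[0], answer[1] = start, end
--             gem_dict[gems[start]] -= 1
--             if gem_dict[gems[start]] == 0:
--                 del gem_dict[gems[start]]
--             start += 1
--             continue
--         if end == gem_len:
--             break
--         if cur_kinds != gem_kinds:
--             gem_dict[gems[end]] += 1
--             end += 1
--             continue
--
--     answer[0] += 1
--
--     return answer
-- ===== SOURCE B (Python) =====
-- def solution(gems):
--     # Brute force: for each start, scan forward for the first end covering all
--     # gem kinds; keep the strictly best (shortest, earliest) window.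
--     n, k = len(gems), len(set(gems))
--     best = (0, n)  # the whole range always covers every kind
--     for s in range(n):
--         seen = set()
--         end = None
--         for e in range(s, n):
--             seen.add(gems[e])
--             if len(seen) == k:
--                 end = e + 1
--                 break
--         if end is not None and end - s < best[1] - best[0]:
--             best = (s, end)
--     return [best[0] + 1, best[1]]
-- ===== Notes on version B (the rewrite author's own statement) =====
-- stated objective: simpler
-- what changed: Replaces A's single-pass two-pointer sliding window with a mutable counter dict (advance end until all kinds present, then shrink from start) by a plain quadratic brute-force scan: for each start index rescan forward with a fresh set until every kind is covered, keeping the strictly shortest (hence earliest) window.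
import Mathlib
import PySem

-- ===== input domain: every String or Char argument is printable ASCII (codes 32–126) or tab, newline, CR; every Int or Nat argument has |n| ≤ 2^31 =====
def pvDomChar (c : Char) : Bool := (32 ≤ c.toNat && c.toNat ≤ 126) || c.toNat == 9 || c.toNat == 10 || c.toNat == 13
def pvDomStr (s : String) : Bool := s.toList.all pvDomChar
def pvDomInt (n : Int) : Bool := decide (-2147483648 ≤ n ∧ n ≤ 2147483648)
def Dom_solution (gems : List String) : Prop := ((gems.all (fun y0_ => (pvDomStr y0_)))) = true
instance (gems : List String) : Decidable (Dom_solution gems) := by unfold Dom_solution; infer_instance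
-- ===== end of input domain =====

-- B replaces A's single-pass two-pointer sliding window (mutable counter dict) by a
-- plain quadratic scan: for each start, rescan forward with a fresh set for the first
-- covering end, keeping the strictly best window (objective: simpler; not faster).

-- ===== PORT A =====
-- the `while True:` loop of A; every iteration advances `start` or `end_` or returns,
-- so fuel `2*len(gems)+2` (supplied by `solution`) is never exhausted
def loopA (g : List String) (gemLen gemKinds : Nat) (fuel : Nat) (start end_ : Nat)
    (answer : Nat × Nat) (gemDict : PySem.Dict String Int) : Nat × Nat :=
  match fuel with
  | 0 => answer
  | fuel + 1 =>
    if start = gemLen then answer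
    else
      let curKinds := gemDict.size
      if curKinds = gemKinds then
        let answer := if end_ - start < answer.2 - answer.1 then (start, end_) else answer
        let x := g.getD start ""          -- gems[start]; start < gemLen throughout
        let gemDict := gemDict.insert x (gemDict.getD x 0 - 1)
        let gemDict := if gemDict.getD x 0 = 0 then gemDict.erase x else gemDict
        loopA g gemLen gemKinds fuel (start + 1) end_ answer gemDict
      else if end_ = gemLen then answer
      else
        let y := g.getD end_ ""           -- gems[end]; end_ < gemLen here
        loopA g gemLen gemKinds fuel start (end_ + 1) answer
          (gemDict.insert y (gemDict.getD y 0 + 1))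

def solution (gems : List String) : List Int :=
  let gemLen := gems.length
  let gemKinds := (PySem.Set.ofList gems).length
  let answer := loopA gems gemLen gemKinds (2 * gemLen + 2) 0 0 (0, gemLen) PySem.Dict.empty
  [(answer.1 : Int) + 1, (answer.2 : Int)]

-- ===== PORT B =====
-- inner `for e in range(s, n)` loop of Source B: first e with all kinds seen, as `some (e+1)`
def innerB (g : List String) (k : Nat) (e : Nat) (seen : PySem.Set String) : Option Nat :=
  if h : e < g.length then
    let seen' := PySem.Set.add seen (g.getD e "")
    if seen'.length = k then some (e + 1) else innerB g k (e + 1) seen'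
  else none
termination_by g.length - e

-- one iteration of the outer `for s in range(n)` loop of Source B
def stepB (g : List String) (k : Nat) (best : Nat × Nat) (s : Nat) : Nat × Nat :=
  match innerB g k s PySem.Set.empty with
  | some e => if e - s < best.2 - best.1 then (s, e) else best
  | none => best

def solution_alt (gems : List String) : List Int :=
  let n := gems.length
  let k := (PySem.Set.ofList gems).length
  let best := (List.range n).foldl (stepB gems k) (0, n)
  [(best.1 : Int) + 1, (best.2 : Int)]

-- ===== PRECONDITION & SPEC =====
def Spec_solution (gems : List String) (out : List Int) : Prop := out = solution_alt gems
instance (gems : List String) (out : List Int) : Decidable (Spec_solution gems out) := by unfold Spec_solution; infer_instance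

-- ===== CLAIM (what is proved, stated in full; the proofs are below) =====
def Claim_equal_solution : Prop := ∀ (gems : List String), Dom_solution gems → Spec_solution gems (solution gems)

-- ===== LEMMAS AND PROOFS =====

-- the window gems[s:e]
def win (g : List String) (s e : Nat) : List String := (g.drop s).take (e - s)

-- number of distinct gems in the window
def kcard (g : List String) (s e : Nat) : Nat := (win g s e).toFinset.card

-- a Nodup list with the same members as w has w.toFinset.card elements
lemma nodup_card {α : Type} [DecidableEq α] {l w : List α} (hn : l.Nodup)
    (hm : ∀ x, x ∈ l ↔ x ∈ w) : l.length = w.toFinset.card := by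
  have h : l.toFinset = w.toFinset := by ext x; simp [List.mem_toFinset, hm x]
  rw [← h, List.toFinset_card_of_nodup hn]

lemma win_self (g : List String) (s : Nat) : win g s s = [] := by simp [win]

lemma win_succ (g : List String) {s e : Nat} (hs : s ≤ e) (he : e < g.length) :
    win g s (e + 1) = win g s e ++ [g.getD e ""] := by
  simp only [win]
  rw [show e + 1 - s = (e - s) + 1 from by omega, List.take_succ]
  have h2 : (g.drop s)[e - s]? = some (g.getD e "") := by
    rw [List.getElem?_drop, show s + (e - s) = e from by omega,
      List.getElem?_eq_getElem he, List.getD_eq_getElem g "" he]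
  rw [h2]
  rfl

lemma kcard_succ (g : List String) {s e : Nat} (hs : s ≤ e) (he : e < g.length) :
    kcard g s (e + 1) = if g.getD e "" ∈ win g s e then kcard g s e else kcard g s e + 1 := by
  rw [kcard, kcard, win_succ g hs he, List.toFinset_append]
  have hu : (win g s e).toFinset ∪ [g.getD e ""].toFinset = insert (g.getD e "") (win g s e).toFinset := by
    ext z; simp
  rw [hu]
  by_cases hmem : g.getD e "" ∈ win g s e
  · rw [if_pos hmem, Finset.card_insert_of_mem (List.mem_toFinset.2 hmem)]
  · rw [if_neg hmem, Finset.card_insert_of_notMem (fun hc => hmem (List.mem_toFinset.1 hc))]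

lemma kcard_mono_e (g : List String) {s e e' : Nat} (h : e ≤ e') :
    kcard g s e ≤ kcard g s e' := by
  apply Finset.card_le_card
  intro x hx
  simp only [List.mem_toFinset, win] at *
  rw [show e - s = min (e - s) (e' - s) from by omega, ← List.take_take] at hx
  exact List.take_subset _ _ hx

lemma kcard_anti_s (g : List String) {s s' e : Nat} (h : s ≤ s') :
    kcard g s' e ≤ kcard g s e := by
  apply Finset.card_le_card
  intro x hx
  simp only [List.mem_toFinset] at *
  by_cases hce : s' ≤ e
  · have hdec : win g s e = win g s s' ++ win g s' e := by
      simp only [win]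
      rw [show e - s = (s' - s) + (e - s') from by omega, List.take_add, List.drop_drop,
        show s + (s' - s) = s' from by omega]
    rw [hdec]
    exact List.mem_append_right _ hx
  · have hnil : win g s' e = [] := by
      simp [win, show e - s' = 0 from by omega]
    rw [hnil] at hx
    cases hx

lemma kcard_le (g : List String) (s e : Nat) : kcard g s e ≤ g.toFinset.card := by
  apply Finset.card_le_card
  intro x hx
  simp only [List.mem_toFinset, win] at *
  exact List.drop_subset _ _ (List.take_subset _ _ hx)

lemma win_nonempty (g : List String) {s e : Nat} (h : win g s e ≠ []) :
    s < e ∧ s < g.length := by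
  constructor
  · by_contra hc
    simp [win, show e - s = 0 from by omega] at h
  · by_contra hc
    have hd : g.drop s = [] := List.drop_eq_nil_of_le (by omega)
    simp [win, hd] at h

lemma win_cons (g : List String) {s e : Nat} (hse : s < e) (hsl : s < g.length) :
    win g s e = g.getD s "" :: win g (s + 1) e := by
  simp only [win]
  rw [List.drop_eq_getElem_cons hsl, show e - s = (e - (s + 1)) + 1 from by omega,
    List.take_succ_cons, List.getD_eq_getElem g "" hsl]

lemma ofList_length (g : List String) : (PySem.Set.ofList g).length = g.toFinset.card :=
  nodup_card (PySem.Set.nodup_ofList g) (fun x => PySem.Set.mem_ofList g x)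

-- seen-set invariant for B's inner loop
def SInv (g : List String) (s e : Nat) (seen : PySem.Set String) : Prop :=
  seen.Nodup ∧ ∀ x, x ∈ seen ↔ x ∈ win g s e

lemma SInv_start (g : List String) (s : Nat) : SInv g s s PySem.Set.empty := by
  constructor
  · exact List.nodup_nil
  · intro x; simp [PySem.Set.empty, win_self]

lemma SInv_step (g : List String) {s e : Nat} {seen : PySem.Set String}
    (hI : SInv g s e seen) (hs : s ≤ e) (he : e < g.length) :
    SInv g s (e + 1) (PySem.Set.add seen (g.getD e "")) ∧
      (PySem.Set.add seen (g.getD e "")).length = kcard g s (e + 1) := by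
  obtain ⟨hnd, hmem⟩ := hI
  have hlen : seen.length = kcard g s e := nodup_card hnd hmem
  refine ⟨⟨PySem.Set.nodup_add seen _ hnd, ?_⟩, ?_⟩
  · intro x
    rw [PySem.Set.mem_add, win_succ g hs he, List.mem_append, List.mem_singleton, hmem x]
  · rw [PySem.Set.add_eq_ite, kcard_succ g hs he]
    by_cases hx : g.getD e "" ∈ win g s e
    · rw [if_pos ((hmem _).2 hx), if_pos hx, hlen]
    · rw [if_neg (fun hc => hx ((hmem _).1 hc)), if_neg hx, List.length_append,
        List.length_singleton, hlen]

lemma inner_some (g : List String) (k s end_ : Nat)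
    (hk : kcard g s end_ = k) (hend : end_ ≤ g.length)
    (hmin : ∀ e', e' < end_ → kcard g s e' ≠ k) :
    ∀ m e seen, end_ - e ≤ m → s ≤ e → e < end_ → SInv g s e seen →
      innerB g k e seen = some end_ := by
  intro m
  induction m with
  | zero => intro e seen hm hse hlt _; omega
  | succ m ih =>
    intro e seen hm hse hlt hI
    have hel : e < g.length := lt_of_lt_of_le hlt hend
    obtain ⟨hI', hlen⟩ := SInv_step g hI hse hel
    rw [innerB, dif_pos hel]
    dsimp only
    by_cases hk2 : (PySem.Set.add seen (g.getD e "")).length = k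
    · have hke : kcard g s (e + 1) = k := by rw [← hlen]; exact hk2
      have heq : e + 1 = end_ := by
        by_contra hne
        exact hmin (e + 1) (by omega) hke
      rw [if_pos hk2, heq]
    · rw [if_neg hk2]
      have hkc : kcard g s (e + 1) ≠ k := by rw [← hlen]; exact hk2
      have hne : e + 1 ≠ end_ := fun hc => hkc (hc ▸ hk)
      exact ih (e + 1) _ (by omega) (by omega) (by omega) hI'

lemma inner_none (g : List String) (k s : Nat) (hub : kcard g s g.length < k) :
    ∀ m e seen, g.length - e ≤ m → s ≤ e → SInv g s e seen →
      innerB g k e seen = none := by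
  intro m
  induction m with
  | zero =>
    intro e seen hm hse _
    rw [innerB, dif_neg (by omega)]
  | succ m ih =>
    intro e seen hm hse hI
    by_cases hel : e < g.length
    · obtain ⟨hI', hlen⟩ := SInv_step g hI hse hel
      have hle : kcard g s (e + 1) ≤ kcard g s g.length := kcard_mono_e g (by omega)
      have hk2 : (PySem.Set.add seen (g.getD e "")).length ≠ k := by rw [hlen]; omega
      rw [innerB, dif_pos hel]
      dsimp only
      rw [if_neg hk2]
      exact ih (e + 1) _ (by omega) (by omega) hI'
    · rw [innerB, dif_neg hel]

lemma stepB_of_none (g : List String) {k s : Nat} (hub : kcard g s g.length < k)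
    (b : Nat × Nat) : stepB g k b s = b := by
  rw [stepB, inner_none g k s hub (g.length - s) s PySem.Set.empty (Nat.le_refl _)
    (Nat.le_refl s) (SInv_start g s)]

lemma stepB_of_found (g : List String) {k s end_ : Nat} (hk1 : 1 ≤ k)
    (hk : kcard g s end_ = k) (hend : end_ ≤ g.length)
    (hmin : ∀ e', e' < end_ → kcard g s e' ≠ k) (b : Nat × Nat) :
    stepB g k b s = if end_ - s < b.2 - b.1 then (s, end_) else b := by
  have hwne : win g s end_ ≠ [] := by
    intro hw
    rw [kcard, hw] at hk
    simp at hk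
    omega
  obtain ⟨hse, _⟩ := win_nonempty g hwne
  rw [stepB, inner_some g k s end_ hk hend hmin (end_ - s) s PySem.Set.empty (Nat.le_refl _)
    (Nat.le_refl s) hse (SInv_start g s)]

-- counter-dict invariant for A's loop
def DI (g : List String) (s e : Nat) (d : PySem.Dict String Int) : Prop :=
  d.keys.Nodup ∧ (∀ x, d.getD x 0 = ((win g s e).count x : Int)) ∧
    (∀ x, x ∈ d.keys ↔ x ∈ win g s e)

lemma DI_empty (g : List String) : DI g 0 0 PySem.Dict.empty := by
  refine ⟨by simp [PySem.Dict.keys_empty], fun x => ?_, fun x => ?_⟩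
  · rw [PySem.Dict.getD_empty, win_self]
    simp
  · rw [PySem.Dict.keys_empty, win_self]

lemma DI_size (g : List String) {s e : Nat} {d : PySem.Dict String Int}
    (h : DI g s e d) : d.size = kcard g s e := by
  obtain ⟨hnd, _, hmem⟩ := h
  have hk : d.keys.length = kcard g s e := nodup_card hnd hmem
  simpa [PySem.Dict.size, PySem.Dict.keys, List.length_map] using hk

lemma get?_erase_self (d : PySem.Dict String Int) (x : String) :
    (d.erase x).get? x = none := by
  simp only [PySem.Dict.erase, PySem.Dict.get?, List.find?_filter]
  rw [List.find?_eq_none.2 (by intro p _; simp)]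
  rfl

lemma get?_erase_of_ne (d : PySem.Dict String Int) {x y : String} (h : y ≠ x) :
    (d.erase x).get? y = d.get? y := by
  simp only [PySem.Dict.erase, PySem.Dict.get?, List.find?_filter]
  congr 1
  apply congrArg (List.find? · d.items)
  funext p
  by_cases hpy : p.1 = y
  · simp [hpy, h]
  · simp [hpy]

lemma keys_erase (d : PySem.Dict String Int) (x : String) :
    (d.erase x).keys = d.keys.filter (fun z => !(z == x)) := by
  simp only [PySem.Dict.erase, PySem.Dict.keys, List.filter_map]
  rfl

lemma DI_add (g : List String) {s e : Nat} {d : PySem.Dict String Int}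
    (hI : DI g s e d) (hs : s ≤ e) (he : e < g.length) :
    DI g s (e + 1) (d.insert (g.getD e "") (d.getD (g.getD e "") 0 + 1)) := by
  obtain ⟨hnd, hcnt, hmem⟩ := hI
  refine ⟨PySem.Dict.nodup_keys_insert d _ _ hnd, fun x => ?_, fun x => ?_⟩
  · rw [PySem.Dict.getD_insert, win_succ g hs he, List.count_append, List.count_singleton]
    by_cases hxy : x = g.getD e ""
    · rw [if_pos hxy, hxy, hcnt]
      simp
    · rw [if_neg hxy, hcnt x]
      have hb : ((g.getD e "") == x) = false := beq_eq_false_iff_ne.mpr (Ne.symm hxy)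
      rw [hb]
      simp
  · rw [PySem.Dict.mem_keys_insert, win_succ g hs he, List.mem_append, List.mem_singleton, hmem x]
    tauto

lemma DI_rem (g : List String) {s e : Nat} {d : PySem.Dict String Int}
    (hI : DI g s e d) (hse : s < e) (hsl : s < g.length) :
    DI g (s + 1) e
      (let x := g.getD s ""
       let d1 := d.insert x (d.getD x 0 - 1)
       if d1.getD x 0 = 0 then d1.erase x else d1) := by
  obtain ⟨hnd, hcnt, hmem⟩ := hI
  obtain ⟨x, hxdef⟩ : ∃ x, x = g.getD s "" := ⟨_, rfl⟩
  dsimp only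
  rw [← hxdef]
  have hwc : win g s e = x :: win g (s + 1) e := by
    rw [hxdef]
    exact win_cons g hse hsl
  have hcx : 1 ≤ (win g s e).count x := List.one_le_count_iff.2 (hwc ▸ List.mem_cons_self)
  have hcount : ∀ z, (win g s e).count z = (win g (s + 1) e).count z + (if z = x then 1 else 0) := by
    intro z
    rw [hwc, List.count_cons]
    by_cases hz : z = x
    · rw [if_pos hz, hz]
      simp
    · rw [if_neg hz]
      have hb : (x == z) = false := beq_eq_false_iff_ne.mpr (Ne.symm hz)
      simp [hb]
  have hd1 : (d.insert x (d.getD x 0 - 1)).getD x 0 = (((win g s e).count x : Int) - 1 : Int) := by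
    rw [PySem.Dict.getD_insert_self, hcnt]
  by_cases h1 : (d.insert x (d.getD x 0 - 1)).getD x 0 = 0
  · rw [if_pos h1]
    rw [hd1] at h1
    have hone : (win g s e).count x = 1 := by omega
    have hw'x : (win g (s + 1) e).count x = 0 := by
      have hc := hcount x
      simp at hc
      omega
    refine ⟨?_, fun z => ?_, fun z => ?_⟩
    · rw [keys_erase]
      exact (PySem.Dict.nodup_keys_insert d x _ hnd).filter _
    · by_cases hz : z = x
      · rw [hz, PySem.Dict.getD_eq_get?_getD, get?_erase_self]
        simp [hw'x]
      · rw [PySem.Dict.getD_eq_get?_getD, get?_erase_of_ne _ hz, ← PySem.Dict.getD_eq_get?_getD,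
          PySem.Dict.getD_insert_of_ne d _ _ hz, hcnt z]
        have hc := hcount z
        simp [hz] at hc
        exact_mod_cast hc
    · rw [keys_erase, List.mem_filter]
      by_cases hz : z = x
      · simp [hz, List.count_eq_zero.1 hw'x]
      · simp [hz, PySem.Dict.mem_keys_insert, hmem z, hwc]
  · rw [if_neg h1]
    rw [hd1] at h1
    have hw'x : (win g (s + 1) e).count x + 1 = (win g s e).count x := by
      have hc := hcount x
      simp at hc
      omega
    refine ⟨PySem.Dict.nodup_keys_insert d x _ hnd, fun z => ?_, fun z => ?_⟩
    · by_cases hz : z = x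
      · rw [hz, PySem.Dict.getD_insert_self, hcnt]
        omega
      · rw [PySem.Dict.getD_insert_of_ne d _ _ hz, hcnt z]
        have hc := hcount z
        simp [hz] at hc
        exact_mod_cast hc
    · rw [PySem.Dict.mem_keys_insert]
      by_cases hz : z = x
      · simp [hz]
        exact List.one_le_count_iff.1 (by omega)
      · simp [hz, hmem z, hwc]

lemma foldl_fixed_mem {α β : Type} (f : β → α → β) (l : List α)
    (h : ∀ x ∈ l, ∀ b, f b x = b) : ∀ b, l.foldl f b = b := by
  induction l with
  | nil => intro b; rfl
  | cons a t ih =>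
    intro b
    rw [List.foldl_cons, h a List.mem_cons_self b]
    exact ih (fun x hx b' => h x (List.mem_cons_of_mem a hx) b') b

lemma loopA_eq (g : List String) (k : Nat) (hk : k = g.toFinset.card) :
    ∀ fuel start end_ ans d,
      (g.length - start) + (g.length - end_) < fuel →
      start ≤ end_ → end_ ≤ g.length →
      DI g start end_ d →
      (∀ e', e' < end_ → kcard g start e' ≠ k) →
      loopA g g.length k fuel start end_ ans d =
        (List.range' start (g.length - start)).foldl (stepB g k) ans := by
  intro fuel
  induction fuel with
  | zero => intro start end_ ans d hfuel hse hen hDI hmin; omega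
  | succ fuel ih =>
    intro start end_ ans d hfuel hse hen hDI hmin
    simp only [loopA]
    by_cases hstart : start = g.length
    · rw [if_pos hstart, hstart]
      simp
    · rw [if_neg hstart]
      have hsl : start < g.length := by omega
      have hksz := DI_size g hDI
      by_cases hcond : d.size = k
      · rw [if_pos hcond]
        have hkc : kcard g start end_ = k := by rw [← hksz]; exact hcond
        have hk1 : 1 ≤ k := by
          obtain ⟨a, ha⟩ := List.exists_mem_of_ne_nil g (by intro hg; rw [hg] at hsl; simp at hsl)
          rw [hk]
          exact Finset.card_pos.2 ⟨a, List.mem_toFinset.2 ha⟩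
        have hwne : win g start end_ ≠ [] := by
          intro hw
          rw [kcard, hw] at hkc
          simp at hkc
          omega
        obtain ⟨hse2, hsl2⟩ := win_nonempty g hwne
        rw [show g.length - start = (g.length - (start + 1)) + 1 from by omega, List.range'_succ,
          List.foldl_cons, stepB_of_found g hk1 hkc hen hmin ans]
        exact ih (start + 1) end_ _ _ (by omega) hse2 hen (DI_rem g hDI hse2 hsl2)
          (fun e' he' => by
            have h1 := hmin e' he'
            have h2 : kcard g start e' ≤ kcard g start end_ := kcard_mono_e g (by omega)
            have h3 : kcard g (start + 1) e' ≤ kcard g start e' := kcard_anti_s g (by omega)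
            omega)
      · rw [if_neg hcond]
        have hne : kcard g start end_ ≠ k := fun hc => hcond (by rw [hksz, hc])
        by_cases hend : end_ = g.length
        · rw [if_pos hend]
          refine (foldl_fixed_mem _ _ ?_ ans).symm
          intro s' hs' b
          rw [List.mem_range'_1] at hs'
          apply stepB_of_none
          have h1 : kcard g s' g.length ≤ kcard g start g.length := kcard_anti_s g hs'.1
          have h2 : kcard g start end_ ≤ g.toFinset.card := kcard_le g _ _
          rw [hend] at hne h2
          omega
        · rw [if_neg hend]
          refine ih start (end_ + 1) ans _ (by omega) (by omega) (by omega)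
            (DI_add g hDI hse (by omega)) ?_
          intro e' he'
          by_cases he2 : e' = end_
          · rw [he2]
            exact hne
          · exact hmin e' (by omega)

-- ===== VERDICT (by name: the statement is the Claim_ definition above) =====
theorem solution_spec : Claim_equal_solution := by
  intro gems _
  unfold Spec_solution solution solution_alt
  have hk := ofList_length gems
  dsimp only
  rw [loopA_eq gems _ hk (2 * gems.length + 2) 0 0 (0, gems.length) PySem.Dict.empty
      (by omega) (Nat.le_refl 0) (Nat.zero_le _) (DI_empty gems) (by omega),
    ← List.range_eq_range']
  simp
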